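-- pv_equiv track=rewrite | github.com/cormac-doyle/AdventOfCode | 2024/day11/p2.py | has_even_digits
-- ===== SOURCE A (Python) =====
-- def has_even_digits(n):
--     if n == 0: return False
--     n = abs(n)
--
--     count = 0
--     while n > 0:
--         n //= 10
--         count += 1
--
--     return count % 2 == 0
-- ===== SOURCE B (Python) =====
-- def has_even_digits(n):
--     return len(str(abs(n))) % 2 == 0
-- ===== Notes on version B (the rewrite author's own statement) =====
-- stated objective: idiomatic
-- what changed: Replaces the explicit zero guard and the divide-by-10 counting loop with the decimal string representation: the digit count is len(str(abs(n))), no loop is maintained.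
import Mathlib
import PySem

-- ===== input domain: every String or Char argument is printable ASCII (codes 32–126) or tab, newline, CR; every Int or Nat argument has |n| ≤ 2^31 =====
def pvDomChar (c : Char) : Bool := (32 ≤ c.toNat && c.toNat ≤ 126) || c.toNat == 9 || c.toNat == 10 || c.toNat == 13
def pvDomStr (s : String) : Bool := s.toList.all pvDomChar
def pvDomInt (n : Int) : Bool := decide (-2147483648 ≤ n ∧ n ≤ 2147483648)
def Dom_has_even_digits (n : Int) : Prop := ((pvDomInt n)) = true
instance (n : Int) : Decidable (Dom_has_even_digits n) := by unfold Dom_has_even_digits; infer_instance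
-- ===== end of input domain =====

-- B replaces A's zero guard and divide-by-10 counting loop by the length of the decimal string of |n| (idiomatic, not faster).

-- ===== PORT A =====
-- the 'while n > 0: n //= 10; count += 1' loop, carrying the same state (n, count)
def pvDigitLoop (n : Int) (count : Int) : Int :=
  if h : 0 < n then pvDigitLoop (PySem.Int.floordiv n 10) (count + 1) else count
termination_by n.toNat
decreasing_by
  rw [PySem.Int.floordiv_eq_ediv_of_pos (by omega)]
  have h1 : ((n.toNat : Int)) = n := Int.toNat_of_nonneg (le_of_lt h)
  have h2 : n / 10 = ((n.toNat / 10 : Nat) : Int) := by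
    rw [← h1]; exact_mod_cast (Int.natCast_ediv n.toNat 10).symm
  have h3 : n.toNat / 10 < n.toNat := Nat.div_lt_self (by omega) (by omega)
  omega

def has_even_digits (n : Int) : Bool :=
  if n = 0 then false
  else decide (PySem.Int.mod (pvDigitLoop |n| 0) 2 = 0)

-- ===== PORT B =====
def has_even_digits_alt (n : Int) : Bool :=
  decide (PySem.Int.mod (PySem.Str.len (PySem.Int.toStr |n|)) 2 = 0)

-- ===== PRECONDITION & SPEC =====
def Spec_has_even_digits (n : Int) (out : Bool) : Prop := out = has_even_digits_alt n
instance (n : Int) (out : Bool) : Decidable (Spec_has_even_digits n out) := by unfold Spec_has_even_digits; infer_instance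

-- ===== CLAIM (what is proved, stated in full; the proofs are below) =====
def Claim_equal_has_even_digits : Prop := ∀ (n : Int), Dom_has_even_digits n → Spec_has_even_digits n (has_even_digits n)

-- ===== LEMMAS AND PROOFS =====

-- A's loop counts Nat.log 10 m + 1 digits on a positive m
lemma pvDigitLoop_eq (m : Nat) (h : 0 < m) : ∀ c : Int, pvDigitLoop (m : Int) c = c + (Nat.log 10 m : Int) + 1 := by
  induction m using Nat.strong_induction_on with
  | _ m ih =>
    intro c
    rw [pvDigitLoop]
    simp only [dif_pos (by exact_mod_cast h : (0:Int) < (m:Int))]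
    have hfd : PySem.Int.floordiv (m : Int) 10 = ((m / 10 : Nat) : Int) := by
      exact_mod_cast PySem.Int.floordiv_natCast m 10
    rw [hfd]
    by_cases h10 : m < 10
    · have hd : m / 10 = 0 := Nat.div_eq_of_lt h10
      rw [hd]
      rw [pvDigitLoop]
      simp only [Nat.cast_zero, dif_neg (by omega : ¬ (0:Int) < 0)]
      have : Nat.log 10 m = 0 := Nat.log_eq_zero_iff.mpr (Or.inl h10)
      rw [this]; ring
    · have hpos : 0 < m / 10 := Nat.div_pos (by omega) (by omega)
      rw [ih (m / 10) (Nat.div_lt_self h (by omega)) hpos (c + 1)]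
      have hlog : Nat.log 10 (m / 10) = Nat.log 10 m - 1 := Nat.log_div_base 10 m
      have hlogpos : 0 < Nat.log 10 m := Nat.log_pos (by omega) (by omega)
      rw [hlog]
      have : ((Nat.log 10 m - 1 : Nat) : Int) = (Nat.log 10 m : Int) - 1 := by omega
      rw [this]; ring

-- length of Nat.toDigitsCore with enough fuel is Nat.log 10 m + 1
lemma pvToDigitsCore_len (m : Nat) : ∀ f : Nat, m < f → (Nat.toDigitsCore 10 f m []).length = Nat.log 10 m + 1 := by
  induction m using Nat.strong_induction_on with
  | _ m ih =>
    intro f hf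
    cases f with
    | zero => omega
    | succ f' =>
      rw [Nat.toDigitsCore]
      by_cases hd : m / 10 = 0
      · simp only [hd]
        have h10 : m < 10 := Nat.lt_of_div_eq_zero (by omega) hd
        simp [Nat.log_eq_zero_iff.mpr (Or.inl h10)]
      · simp only [if_neg hd]
        rw [Nat.toDigitsCore_lens_eq 10 f' (m / 10) (Nat.digitChar (m % 10)) []]
        have hmpos : 0 < m := by
          by_contra hc
          have : m = 0 := by omega
          simp [this] at hd
        have hrec := ih (m / 10) (Nat.div_lt_self hmpos (by omega)) f' (by
          have := Nat.div_lt_self hmpos (show 1 < 10 by omega)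
          omega)
        rw [hrec]
        have h10le : 10 ≤ m := by
          by_contra hc
          exact hd (Nat.div_eq_of_lt (by omega))
        have hlog : Nat.log 10 (m / 10) = Nat.log 10 m - 1 := Nat.log_div_base 10 m
        have hlogpos : 0 < Nat.log 10 m := Nat.log_pos (by omega) (by omega)
        omega

lemma pvToDigits_len (m : Nat) : (Nat.toDigits 10 m).length = Nat.log 10 m + 1 := by
  unfold Nat.toDigits
  exact pvToDigitsCore_len m (m + 1) (by omega)

-- B's digit count equals Nat.log 10 |n| + 1
lemma pvAltLen (n : Int) : PySem.Str.len (PySem.Int.toStr |n|) = (Nat.log 10 n.natAbs : Int) + 1 := by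
  have habs : ¬ (|n| < 0) := not_lt.mpr (abs_nonneg n)
  rw [PySem.Str.len_eq, PySem.Int.toList_toStr]
  unfold PySem.Int.toChars
  rw [if_neg habs]
  have : |n|.toNat = n.natAbs := by
    rw [Int.abs_eq_natAbs]; exact Int.toNat_natCast _
  rw [this, pvToDigits_len]
  push_cast; ring

-- ===== VERDICT (by name: the statement is the Claim_ definition above) =====
theorem has_even_digits_spec : Claim_equal_has_even_digits := by
  intro n _
  unfold Spec_has_even_digits has_even_digits has_even_digits_alt
  by_cases h0 : n = 0
  · subst h0; decide
  · rw [if_neg h0, pvAltLen]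
    have habs : |n| = (n.natAbs : Int) := Int.abs_eq_natAbs n
    have hpos : 0 < n.natAbs := by omega
    rw [habs, pvDigitLoop_eq n.natAbs hpos 0]
    norm_num
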